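-- pv_equiv track=rewrite | github.com/Ti-Yao/MultiFlow | deep_temporal_clustering/utils.py | find_truncate_index
-- ===== SOURCE A (Python) =====
-- def find_truncate_index(lst):
--     if not lst:
--         return None  # Handle empty list case
--
--     last_value = lst[-1]  # The repeating value at the end
--     for i in range(len(lst) - 2, -1, -1):  # Traverse backward
--         if lst[i] != last_value:
--             return i + 1  # The first index of the repeating sequence
--     return 0  # If the entire list is the same value
-- ===== SOURCE B (Python) =====
-- def find_truncate_index(lst):
--     if not lst:
--         return None  # Handle empty list case
--     last = lst[-1]
--     result = 0
--     for i, x in enumerate(lst):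
--         if x != last:
--             result = i + 1
--     return result
-- ===== Notes on version B (the rewrite author's own statement) =====
-- stated objective: alternative
-- what changed: Replaces the backward early-return scan with a single forward pass over enumerate that maintains a running 1 + last-mismatch-index accumulator and returns it after the full pass.
import Mathlib
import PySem

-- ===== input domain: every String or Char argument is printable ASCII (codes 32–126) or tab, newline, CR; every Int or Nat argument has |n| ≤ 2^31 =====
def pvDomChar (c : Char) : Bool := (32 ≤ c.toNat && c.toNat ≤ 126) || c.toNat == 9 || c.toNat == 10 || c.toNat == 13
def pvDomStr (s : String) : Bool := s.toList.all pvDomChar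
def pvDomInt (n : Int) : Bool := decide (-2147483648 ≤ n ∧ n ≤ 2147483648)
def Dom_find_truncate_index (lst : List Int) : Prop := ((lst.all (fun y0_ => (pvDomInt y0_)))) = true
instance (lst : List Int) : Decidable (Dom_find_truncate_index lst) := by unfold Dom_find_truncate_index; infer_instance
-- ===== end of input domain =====

-- B replaces A's backward early-return scan by a forward single pass keeping a
-- running "1 + last mismatch index" accumulator (alternative decomposition, same cost).

-- ===== PORT A =====
-- A's backward for-loop with early return: recursion over the descending index list.
def ftiLoopA (lst : List Int) (last : Int) : List Int → Option Int
  | [] => none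
  | i :: rest =>
    if PySem.List.pyGetD lst i 0 ≠ last then some (i + 1)
    else ftiLoopA lst last rest

def find_truncate_index (lst : List Int) : Option Int :=
  if lst = [] then none
  else
    let last := PySem.List.pyGetD lst (-1) 0
    match ftiLoopA lst last (PySem.List.pyRange (PySem.List.len lst - 2) (-1) (-1)) with
    | some v => some v
    | none => some 0

-- ===== PORT B =====
def find_truncate_index_alt (lst : List Int) : Option Int :=
  if lst = [] then none
  else
    let last := PySem.List.pyGetD lst (-1) 0
    some ((PySem.List.enumerate lst 0).foldl
      (fun result p => if p.2 ≠ last then p.1 + 1 else result) 0)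

-- ===== PRECONDITION & SPEC =====
def Spec_find_truncate_index (lst : List Int) (out : Option Int) : Prop := out = find_truncate_index_alt lst
instance (lst : List Int) (out : Option Int) : Decidable (Spec_find_truncate_index lst out) := by unfold Spec_find_truncate_index; infer_instance

-- ===== CLAIM (what is proved, stated in full; the proofs are below) =====
def Claim_equal_find_truncate_index : Prop := ∀ (lst : List Int), Dom_find_truncate_index lst → Spec_find_truncate_index lst (find_truncate_index lst)

-- ===== LEMMAS AND PROOFS =====

-- Core invariant: A's backward scan from index k-1 computes the same value as
-- B's forward fold over the first k elements of ys (lst = ys ++ [z], last = z).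
lemma fti_key (ys : List Int) (z : Int) :
    ∀ (k : Nat), k ≤ ys.length →
      (match ftiLoopA (ys ++ [z]) z (PySem.List.pyRange ((k : Int) - 1) (-1) (-1)) with
       | some v => v | none => 0)
      = (PySem.List.enumerate (ys.take k) 0).foldl
          (fun result p => if p.2 ≠ z then p.1 + 1 else result) 0 := by
  intro k
  induction k with
  | zero =>
    intro _
    rw [PySem.List.pyRange_neg_one_eq_nil (by omega)]
    simp [ftiLoopA]
  | succ k ih =>
    intro hk
    have hk' : k < ys.length := by omega
    have hcons : PySem.List.pyRange (((k : Nat) + 1 : Int) - 1) (-1) (-1)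
        = (k : Int) :: PySem.List.pyRange ((k : Int) - 1) (-1) (-1) := by
      have : (((k : Nat) + 1 : Int) - 1) = (k : Int) := by omega
      rw [this, PySem.List.pyRange_neg_one_cons (by omega)]
    have hget : PySem.List.pyGetD (ys ++ [z]) (k : Int) 0 = ys[k] := by
      rw [PySem.List.pyGetD_natCast]
      have : k < (ys ++ [z]).length := by simp; omega
      rw [List.getD_eq_getElem _ _ this]
      exact List.getElem_append_left hk'
    have htake : ys.take (k + 1) = ys.take k ++ [ys[k]] := by
      exact List.take_succ_eq_append_getElem hk'
    push_cast
    push_cast at hcons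
    rw [hcons]
    show (match (if PySem.List.pyGetD (ys ++ [z]) (k : Int) 0 ≠ z then some ((k : Int) + 1)
                 else ftiLoopA (ys ++ [z]) z (PySem.List.pyRange ((k : Int) - 1) (-1) (-1))) with
          | some v => v | none => 0) = _
    rw [htake, PySem.List.enumerate_append]
    have hlen : (ys.take k).length = k := by simp [hk'.le]
    rw [List.foldl_append]
    simp only [hlen, PySem.List.enumerate, List.foldl_cons, List.foldl_nil]
    by_cases hne : ys[k] ≠ z
    · simp [hget, hne]
    · push Not at hne
      simp only [hget, hne, ne_eq, not_true_eq_false, if_false]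
      exact ih (by omega)

lemma fti_eq (lst : List Int) : find_truncate_index lst = find_truncate_index_alt lst := by
  rcases List.eq_nil_or_concat lst with h | ⟨ys, z, h⟩
  · simp [h, find_truncate_index, find_truncate_index_alt]
  · subst h
    simp only [List.concat_eq_append]
    have hne : ys ++ [z] ≠ [] := by simp
    unfold find_truncate_index find_truncate_index_alt
    rw [if_neg hne, if_neg hne]
    have hlast : PySem.List.pyGetD (ys ++ [z]) (-1) 0 = z :=
      PySem.List.pyGetD_neg_one_append_singleton ..
    rw [hlast]
    have hlen : PySem.List.len (ys ++ [z]) - 2 = ((ys.length : Int)) - 1 := by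
      simp [PySem.List.len]; omega
    rw [hlen]
    have key := fti_key ys z ys.length le_rfl
    rw [List.take_length] at key
    -- B's fold over the full list: last element equals z, so it keeps the accumulator
    have hB : (PySem.List.enumerate (ys ++ [z]) 0).foldl
        (fun result p => if p.2 ≠ z then p.1 + 1 else result) 0
        = (PySem.List.enumerate ys 0).foldl
        (fun result p => if p.2 ≠ z then p.1 + 1 else result) 0 := by
      rw [PySem.List.enumerate_append, List.foldl_append]
      simp [PySem.List.enumerate]
    show (match ftiLoopA (ys ++ [z]) z (PySem.List.pyRange ((ys.length : Int) - 1) (-1) (-1)) with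
          | some v => some v | none => some 0)
        = some ((PySem.List.enumerate (ys ++ [z]) 0).foldl
            (fun result p => if p.2 ≠ z then p.1 + 1 else result) 0)
    rw [hB, ← key]
    cases ftiLoopA (ys ++ [z]) z (PySem.List.pyRange ((ys.length : Int) - 1) (-1) (-1)) <;> simp

-- ===== VERDICT (by name: the statement is the Claim_ definition above) =====
theorem find_truncate_index_spec : Claim_equal_find_truncate_index := by
  intro lst _
  unfold Spec_find_truncate_index
  exact fti_eq lst
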